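-- pv_equiv track=rewrite | github.com/Sparkle-Muffin/Python_100_days_course | day86/main.py | expand_to_1000
-- ===== SOURCE A (Python) =====
-- def expand_to_1000(base_list):
--     """Return a list of at least 1000 items based on base_list."""
--     if len(base_list) >= 1000:
--         return base_list[:1000]
--
--     words = []
--     index = 0
--     while len(words) < 1000:
--         words.append(base_list[index % len(base_list)])
--         index += 1
--     return words
-- ===== SOURCE B (Python) =====
-- def expand_to_1000(base_list):
--     """Return a list of at least 1000 items based on base_list."""
--     if len(base_list) >= 1000:
--         return base_list[:1000]
--     k = 1000 // len(base_list) + 1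
--     return (list(base_list) * k)[:1000]
-- ===== Notes on version B (the rewrite author's own statement) =====
-- stated objective: idiomatic
-- what changed: Replaces the element-by-element while loop with modular indexing by one repetition-and-slice step: tile the list 1000//len+1 times and slice to 1000.
import Mathlib
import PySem

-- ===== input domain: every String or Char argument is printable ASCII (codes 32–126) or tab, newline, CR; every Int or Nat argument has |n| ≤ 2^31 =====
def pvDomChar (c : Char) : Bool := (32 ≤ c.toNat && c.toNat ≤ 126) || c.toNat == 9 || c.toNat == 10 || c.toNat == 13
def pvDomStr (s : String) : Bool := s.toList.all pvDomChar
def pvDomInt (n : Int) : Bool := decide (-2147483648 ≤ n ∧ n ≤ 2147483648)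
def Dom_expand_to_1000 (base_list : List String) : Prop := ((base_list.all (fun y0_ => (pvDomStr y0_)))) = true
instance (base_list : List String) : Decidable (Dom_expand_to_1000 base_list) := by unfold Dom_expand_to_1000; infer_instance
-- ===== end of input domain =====

-- B replaces the element-by-element while loop with one repetition-and-slice step (idiomatic rewrite; same cost).


-- ===== PORT A =====
-- the while loop: runs while words.length < 1000, appending base_list[index % len];
-- since each iteration appends exactly one element, fuel 1000 covers every iteration.
-- `index % base_list.length` is always in range for nonempty base_list (Pre_), so getD is exact there.
def expandLoopA (base_list : List String) (words : List String) (index : Nat) (fuel : Nat) : List String :=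
  match fuel with
  | 0 => words
  | fuel + 1 =>
      if words.length < 1000 then
        expandLoopA base_list (words ++ [base_list.getD (index % base_list.length) ""]) (index + 1) fuel
      else words

def expand_to_1000 (base_list : List String) : List String :=
  if base_list.length ≥ 1000 then base_list.take 1000
  else expandLoopA base_list [] 0 1000

-- ===== PORT B =====
def expand_to_1000_alt (base_list : List String) : List String :=
  if base_list.length ≥ 1000 then base_list.take 1000
  else
    let k := 1000 / base_list.length + 1
    ((List.replicate k base_list).flatten).take 1000

-- ===== PRECONDITION & SPEC =====
-- Pre_ excludes only the empty list, on which both Pythons raise ZeroDivisionError.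
def Pre_expand_to_1000 (base_list : List String) : Prop := base_list ≠ []
instance (base_list : List String) : Decidable (Pre_expand_to_1000 base_list) := by unfold Pre_expand_to_1000; infer_instance
def pvWitness_expand_to_1000 : List String := ["a", "b"]
def Spec_expand_to_1000 (base_list : List String) (out : List String) : Prop := out = expand_to_1000_alt base_list
instance (base_list : List String) (out : List String) : Decidable (Spec_expand_to_1000 base_list out) := by unfold Spec_expand_to_1000; infer_instance

-- ===== CLAIM (what is proved, stated in full; the proofs are below) =====
def Claim_equal_expand_to_1000 : Prop := ∀ (base_list : List String), Dom_expand_to_1000 base_list → Pre_expand_to_1000 base_list → Spec_expand_to_1000 base_list (expand_to_1000 base_list)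

-- ===== LEMMAS AND PROOFS =====

-- A's loop appends, in order, the elements base_list[(index+j) % len] for j < fuel.
theorem expandLoopA_eq (bl : List String) :
    ∀ (fuel : Nat) (words : List String) (index : Nat), words.length + fuel = 1000 →
      expandLoopA bl words index fuel
        = words ++ (List.range fuel).map (fun j => bl.getD ((index + j) % bl.length) "") := by
  intro fuel
  induction fuel with
  | zero => intro words index h; simp [expandLoopA]
  | succ n ih =>
      intro words index h
      have hlt : words.length < 1000 := by omega
      rw [expandLoopA, if_pos hlt, ih _ (index + 1) (by simp; omega)]
      rw [List.range_succ_eq_map, List.map_cons, List.map_map, List.append_assoc]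
      congr 1
      rw [List.singleton_append, List.cons_eq_cons]
      refine ⟨by simp, ?_⟩
      apply List.map_congr_left
      intro j _
      simp only [Function.comp_apply]
      congr 2
      omega

theorem map_range_getD (bl : List String) :
    (List.range bl.length).map (fun j => bl.getD j "") = bl := by
  apply List.ext_getElem
  · simp
  · intro i h1 h2
    simp only [List.getElem_map, List.getElem_range]
    simp [List.getElem?_eq_getElem h2]

theorem flatten_replicate (bl : List String) :
    ∀ k : Nat, (List.replicate k bl).flatten
      = (List.range (k * bl.length)).map (fun j => bl.getD (j % bl.length) "") := by
  intro k
  induction k with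
  | zero => simp
  | succ n ih =>
      rw [List.replicate_succ, List.flatten_cons, ih]
      have : (n + 1) * bl.length = bl.length + n * bl.length := by ring
      rw [this, List.range_add, List.map_append, List.map_map]
      congr 1
      · symm
        rw [show (fun j => bl.getD (j % bl.length) "") = (fun j : Nat => if j < bl.length then bl.getD (j % bl.length) "" else bl.getD (j % bl.length) "") by simp]
        calc (List.range bl.length).map _ = (List.range bl.length).map (fun j => bl.getD j "") := by
              apply List.map_congr_left
              intro a ha
              simp only [List.mem_range] at ha
              simp [Nat.mod_eq_of_lt ha]
          _ = bl := map_range_getD bl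
      · apply List.map_congr_left
        intro a _
        simp [Nat.add_mod_left]

-- ===== VERDICT (by name: the statement is the Claim_ definition above) =====
set_option maxRecDepth 20000 in
theorem expand_to_1000_spec : Claim_equal_expand_to_1000 := by
  intro bl _ hpre
  unfold Spec_expand_to_1000 expand_to_1000 expand_to_1000_alt
  by_cases hlen : bl.length ≥ 1000
  · simp [hlen]
  · simp only [hlen, if_false]
    have hn : 0 < bl.length := List.length_pos_iff.mpr hpre
    rw [expandLoopA_eq bl 1000 [] 0 (by simp), flatten_replicate]
    have hk : 1000 ≤ (1000 / bl.length + 1) * bl.length := by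
      have := Nat.div_add_mod 1000 bl.length
      have := Nat.mod_lt 1000 hn
      nlinarith
    rw [← List.map_take, List.take_range, List.nil_append]
    have : min 1000 ((1000 / bl.length + 1) * bl.length) = 1000 := by omega
    rw [this]
    apply List.map_congr_left
    intro a _
    simp only [Nat.zero_add]
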